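-- pv_equiv track=rewrite | github.com/mehul-tandel/Data_Structures_and_Algorithms | python/Trees/checkIfSubtree.py | check
-- ===== SOURCE A (Python) =====
-- def check(tree,subtree):
--     if len(subtree) > len(tree):
--         return False
--     for i in range(len(tree)-len(subtree)+1):
--         j = 0
--         if tree[i] == subtree[j]:
--             while j<len(subtree):
--                 if tree[i+j] != subtree[j]:
--                     break
--                 j+=1
--
--             if j == len(subtree):
--                 return True
--     return False
-- ===== SOURCE B (Python) =====
-- def check(tree, subtree):
--     m = len(subtree)
--     t = tree
--     while len(t) >= m:
--         if t[:m] == subtree: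
--             return True
--         t = t[1:]
--     return False
-- ===== Notes on version B (the rewrite author's own statement) =====
-- stated objective: idiomatic
-- what changed: Replaces A's index loop with first-element guard and inner while over offsets by a structural scan over the suffixes of tree, comparing the whole leading slice against subtree at each step (the standard isInfixOf decomposition).
-- crash fix: A raises IndexError whenever subtree is empty (it unconditionally evaluates subtree[0]); B returns True there, since the empty list is a contiguous subsequence of every list. — e.g. on check([1, 2], []): A raises IndexError, B returns true
import Mathlib
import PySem

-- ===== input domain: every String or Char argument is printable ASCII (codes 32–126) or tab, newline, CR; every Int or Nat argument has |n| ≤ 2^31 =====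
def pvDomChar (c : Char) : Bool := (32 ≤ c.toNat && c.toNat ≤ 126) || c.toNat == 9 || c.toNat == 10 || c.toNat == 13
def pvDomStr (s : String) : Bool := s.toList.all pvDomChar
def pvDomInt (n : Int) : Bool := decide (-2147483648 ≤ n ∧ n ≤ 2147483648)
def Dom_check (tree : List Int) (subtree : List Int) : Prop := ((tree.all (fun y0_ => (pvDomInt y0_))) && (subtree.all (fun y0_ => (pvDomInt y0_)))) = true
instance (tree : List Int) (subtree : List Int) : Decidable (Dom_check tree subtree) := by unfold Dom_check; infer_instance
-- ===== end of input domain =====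

-- B replaces A's index loop (first-element guard + inner while over offsets) by a structural
-- scan of the suffixes of tree, comparing the whole leading slice against subtree each step.

-- ===== PORT A =====
-- A's inner 'while j < len(subtree)' loop; returns the final value of j.
-- pyGetD's default 0 is never consulted on Pre_ (all indices are in range there).
def checkWhile (tree subtree : List Int) (i : Int) (j : Nat) : Nat :=
  if j < subtree.length then
    if PySem.List.pyGetD tree (i + j) 0 ≠ PySem.List.pyGetD subtree (j : Int) 0 then j
    else checkWhile tree subtree i (j + 1)
  else j
termination_by subtree.length - j

-- A's 'for i in range(...)' loop with its early return
def checkLoop (tree subtree : List Int) : List Int → Bool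
  | [] => false
  | i :: rest =>
      if PySem.List.pyGetD tree i 0 = PySem.List.pyGetD subtree 0 0 then
        if checkWhile tree subtree i 0 = subtree.length then true
        else checkLoop tree subtree rest
      else checkLoop tree subtree rest

def check (tree : List Int) (subtree : List Int) : Bool :=
  if (subtree.length : Int) > (tree.length : Int) then false
  else checkLoop tree subtree (PySem.List.pyRange 0 ((tree.length : Int) - (subtree.length : Int) + 1) 1)

-- ===== PORT B =====
-- Source B's 'while len(t) >= m' loop over the suffixes t of tree; t[:m] with m = len(subtree) ≥ 0
-- is List.take m t.  On t = [] the loop body runs (and matches) exactly when subtree = [].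
def altGo (subtree : List Int) : List Int → Bool
  | [] => decide (subtree = [])
  | x :: t =>
      if subtree.length ≤ (x :: t).length then
        if (x :: t).take subtree.length = subtree then true
        else altGo subtree t
      else false

def check_alt (tree : List Int) (subtree : List Int) : Bool := altGo subtree tree

-- ===== PRECONDITION & SPEC =====
-- A unconditionally evaluates subtree[0] inside the loop, so it raises IndexError whenever
-- subtree is empty (and tree's length allows one loop iteration — i.e. always, since
-- range(len(tree)+1) is nonempty); Pre_ excludes exactly the empty subtree.
def Pre_check (tree : List Int) (subtree : List Int) : Prop := subtree ≠ []
instance (tree : List Int) (subtree : List Int) : Decidable (Pre_check tree subtree) := by unfold Pre_check; infer_instance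
def pvWitness_check : List Int × List Int := ([1, 2, 3], [2, 3])

-- A raises IndexError on every input with subtree = []; B returns True there (the empty list
-- is a contiguous subsequence of every list).
def Raises_check (tree : List Int) (subtree : List Int) : Prop := subtree = []
instance (tree : List Int) (subtree : List Int) : Decidable (Raises_check tree subtree) := by unfold Raises_check; infer_instance
def pvRaiseWitness_check : List Int × List Int := ([1, 2], [])
def pvRaiseWitnessOut_check : Bool := true

def Spec_check (tree : List Int) (subtree : List Int) (out : Bool) : Prop := out = check_alt tree subtree
instance (tree : List Int) (subtree : List Int) (out : Bool) : Decidable (Spec_check tree subtree out) := by unfold Spec_check; infer_instance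

-- ===== CLAIM (what is proved, stated in full; the proofs are below) =====
def Claim_equal_check : Prop := ∀ (tree : List Int) (subtree : List Int), Dom_check tree subtree → Pre_check tree subtree → Spec_check tree subtree (check tree subtree)
def Claim_raises_check : Prop := (∀ (tree : List Int) (subtree : List Int), Dom_check tree subtree → Raises_check tree subtree → ¬ Pre_check tree subtree) ∧ (Dom_check (pvRaiseWitness_check.1) (pvRaiseWitness_check.2) ∧ Raises_check (pvRaiseWitness_check.1) (pvRaiseWitness_check.2) ∧ check_alt (pvRaiseWitness_check.1) (pvRaiseWitness_check.2) = pvRaiseWitnessOut_check)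

-- ===== LEMMAS AND PROOFS =====

-- the common specification: subtree occurs as a contiguous block somewhere in tree
def Occurs (tree subtree : List Int) : Prop :=
  ∃ p : Nat, (tree.drop p).take subtree.length = subtree

theorem occurs_length_le {tree subtree : List Int} (h : Occurs tree subtree) :
    subtree.length ≤ tree.length := by
  obtain ⟨p, hp⟩ := h
  have := congrArg List.length hp
  simp [List.length_take, List.length_drop] at this
  omega

theorem altGo_eq_true_iff (subtree : List Int) (t : List Int) :
    altGo subtree t = true ↔ Occurs t subtree := by
  induction t with
  | nil =>
      simp [altGo, Occurs, List.drop_nil, List.take_nil, eq_comm]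
  | cons x t ih =>
      by_cases hlen : subtree.length ≤ (x :: t).length
      · by_cases hm : (x :: t).take subtree.length = subtree
        · simp only [altGo, hlen, if_pos, hm, if_pos]
          constructor
          · intro _; exact ⟨0, by simpa using hm⟩
          · intro _; trivial
        · simp only [altGo, if_pos hlen, if_neg hm]
          rw [ih]
          constructor
          · rintro ⟨p, hp⟩; exact ⟨p + 1, by simpa using hp⟩
          · rintro ⟨p, hp⟩
            cases p with
            | zero => exact absurd (by simpa using hp) hm
            | succ q => exact ⟨q, by simpa using hp⟩
      · simp only [altGo, if_neg hlen]
        constructor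
        · intro h; cases h
        · intro h; exact absurd (occurs_length_le h) hlen

-- pointwise characterisation of a match at offset p (inside the bounds)
theorem match_iff_pointwise {tree subtree : List Int} {p : Nat}
    (h : p + subtree.length ≤ tree.length) :
    (tree.drop p).take subtree.length = subtree ↔
      ∀ k, k < subtree.length → tree.getD (p + k) 0 = subtree.getD k 0 := by
  constructor
  · intro he k hk
    have := congrArg (fun l => l.getD k 0) he
    simp only [List.getD] at this ⊢
    rw [List.getElem?_take, List.getElem?_drop] at this
    simpa [hk] using this
  · intro hpt
    apply List.ext_getElem
    · simp [List.length_take, List.length_drop]; omega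
    · intro k hk1 hk2
      have hk : k < subtree.length := hk2
      have := hpt k hk
      have hpk : p + k < tree.length := by omega
      rw [List.getD_eq_getElem tree 0 hpk, List.getD_eq_getElem subtree 0 hk] at this
      simpa [List.getElem_take, List.getElem_drop] using this

theorem checkWhile_eq_length_iff (tree subtree : List Int) (p : Nat)
    (hb : p + subtree.length ≤ tree.length) :
    ∀ j, j ≤ subtree.length →
      (checkWhile tree subtree (p : Int) j = subtree.length ↔
        ∀ k, j ≤ k → k < subtree.length → tree.getD (p + k) 0 = subtree.getD k 0) := by
  intro j
  induction hn : subtree.length - j generalizing j with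
  | zero =>
      intro hj
      have hj' : j = subtree.length := by omega
      rw [checkWhile]
      simp only [hj', lt_irrefl]
      constructor
      · intro _ k hk1 hk2; omega
      · intro _; rfl
  | succ d ih =>
      intro hj
      have hjlt : j < subtree.length := by omega
      rw [checkWhile]
      rw [if_pos hjlt]
      have g1 : PySem.List.pyGetD tree ((p : Int) + (j : Int)) 0 = tree.getD (p + j) 0 := by
        rw [show ((p : Int) + (j : Int)) = ((p + j : Nat) : Int) by push_cast; ring,
          PySem.List.pyGetD_natCast]
      have g2 : PySem.List.pyGetD subtree ((j : Nat) : Int) 0 = subtree.getD j 0 :=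
        PySem.List.pyGetD_natCast subtree j 0
      by_cases hne : tree.getD (p + j) 0 ≠ subtree.getD j 0
      · rw [if_pos (by rw [g1, g2]; exact hne)]
        constructor
        · intro h; omega
        · intro h; exact absurd (h j le_rfl hjlt) hne
      · push Not at hne
        rw [if_neg (by rw [g1, g2]; simpa using hne)]
        rw [ih (j + 1) (by omega) (by omega)]
        constructor
        · intro h k hk1 hk2
          rcases Nat.eq_or_lt_of_le hk1 with rfl | hlt
          · exact hne
          · exact h k hlt hk2
        · intro h k hk1 hk2; exact h k (by omega) hk2

theorem checkLoop_eq_true_iff (tree subtree : List Int) (is : List Int) :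
    checkLoop tree subtree is = true ↔
      ∃ i ∈ is, PySem.List.pyGetD tree i 0 = PySem.List.pyGetD subtree 0 0 ∧
        checkWhile tree subtree i 0 = subtree.length := by
  induction is with
  | nil => simp [checkLoop]
  | cons i rest ih =>
      simp only [checkLoop]
      split_ifs with h1 h2
      · simp [h1, h2]
      · rw [ih]
        constructor
        · rintro ⟨i', hm, hp⟩; exact ⟨i', List.mem_cons_of_mem _ hm, hp⟩
        · rintro ⟨i', hm, hg, hw⟩
          rcases List.mem_cons.mp hm with rfl | hm'
          · exact absurd hw h2
          · exact ⟨i', hm', hg, hw⟩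
      · rw [ih]
        constructor
        · rintro ⟨i', hm, hp⟩; exact ⟨i', List.mem_cons_of_mem _ hm, hp⟩
        · rintro ⟨i', hm, hg, hw⟩
          rcases List.mem_cons.mp hm with rfl | hm'
          · exact absurd hg h1
          · exact ⟨i', hm', hg, hw⟩

theorem check_eq_true_iff (tree subtree : List Int) (hpre : subtree ≠ []) :
    check tree subtree = true ↔ Occurs tree subtree := by
  have hm0 : 0 < subtree.length := List.length_pos_iff.mpr hpre
  by_cases hlen : (subtree.length : Int) > (tree.length : Int)
  · rw [check, if_pos hlen]
    constructor
    · intro h; cases h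
    · intro h; exact absurd (occurs_length_le h) (by exact_mod_cast by omega)
  · rw [check, if_neg hlen]
    have hmn : subtree.length ≤ tree.length := by exact_mod_cast by omega
    rw [checkLoop_eq_true_iff]
    constructor
    · rintro ⟨i, hmem, hg, hw⟩
      rw [PySem.List.mem_pyRange_one] at hmem
      obtain ⟨hi0, hiu⟩ := hmem
      set p := i.toNat with hp
      have hip : i = (p : Int) := by omega
      have hb : p + subtree.length ≤ tree.length := by omega
      refine ⟨p, (match_iff_pointwise hb).mpr ?_⟩
      intro k hk
      have := (checkWhile_eq_length_iff tree subtree p hb 0 (by omega)).mp (by rwa [hip] at hw)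
      exact this k (by omega) hk
    · rintro ⟨p, hocc⟩
      have hb : p + subtree.length ≤ tree.length := by
        have := occurs_length_le (tree := tree.drop p) ⟨0, by simpa using hocc⟩
        simp [List.length_drop] at this
        omega
      have hpt := (match_iff_pointwise hb).mp hocc
      refine ⟨(p : Int), ?_, ?_, ?_⟩
      · rw [PySem.List.mem_pyRange_one]
        constructor
        · exact_mod_cast Nat.zero_le p
        · have : p + subtree.length ≤ tree.length := hb
          omega
      · have h0 := hpt 0 hm0
        simpa [PySem.List.pyGetD_natCast, PySem.List.pyGetD_zero] using h0
      · exact (checkWhile_eq_length_iff tree subtree p hb 0 (by omega)).mpr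
          (fun k _ hk => hpt k hk)

-- ===== VERDICT (by name: the statement is the Claim_ definition above) =====
theorem check_spec : Claim_equal_check := by
  intro tree subtree _ hpre
  unfold Spec_check check_alt
  have h1 := check_eq_true_iff tree subtree hpre
  have h2 := altGo_eq_true_iff subtree tree
  cases hA : check tree subtree <;> cases hB : altGo subtree tree
  · rfl
  · exact absurd (h1.mpr (h2.mp hB)) (by simp [hA])
  · exact absurd (h2.mpr (h1.mp hA)) (by simp [hB])
  · rfl

theorem check_raises : Claim_raises_check := by
  unfold Claim_raises_check
  exact ⟨fun tree subtree _ hr hpre => hpre hr, by decide⟩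

-- witness self-check, re-using check_raises: B's port really returns the stated value there
theorem pvRaiseWitnessOut_ok : check_alt pvRaiseWitness_check.1 pvRaiseWitness_check.2 = pvRaiseWitnessOut_check :=
  check_raises.2.2.2
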